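-- pv_equiv track=rewrite | github.com/KareemAlaa2001/GCNUserClassifier | src/generalised/lib/stackoverflowproc/labelBuilder.py | getSheriffBadgeUserIds
-- ===== SOURCE A (Python) =====
-- def getSheriffBadgeUserIds(users):
--     sheriffNames = getSheriffBadgeDisplayNames()
--     namesToIds = {}
--     for user in users:
--         userDisName = user.get('DisplayName')
--
--         if userDisName in sheriffNames:
--             if namesToIds.get(userDisName) is not None:
--                 idlist = namesToIds.get(userDisName)
--                 idlist.append(user.get('Id'))
--                 namesToIds[userDisName] = idlist
--
--             else:
--                 namesToIds[userDisName] = [user.get('Id')]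
--
--     namesToIds["Kev"] = ['419']
--     namesToIds["Max"] = ['189572']
--
--     idList = []
--
--     for name in namesToIds:
--         idList.append(namesToIds.get(name)[0])
--
--     return idList
--
-- def getSheriffBadgeDisplayNames():
--     sheriffDisplayNames = ["Journeyman Geek", "Yaakov Ellis", "Mendy Rodriguez", "Ham Vocke",
--     "Jane Willborn", "Tinkeringbell", "Laura Campbell", "Sara Chipps", "Aaron Shekey", "Ben Kelly", "g3rv4", "Vasudha Swaminathan", "kristinalustig",
--     "Horia Coman", "Ted Goas", "Benjamin Hodgson", "Des", "Tom Floyd", "Nicolas Chabanovsky", "Kurtis Beavers",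
--     "Donna", "Alex Miller", "Dean Ward", "Alex Warren", "Jon Chan", "Brian Nickel", "Tom Limoncelli", "Juice", "Hynes", "Kasra Rahjerdi", "ChrisF", "Gordon",
--     "Flexo", "Andrew Barber", "Max", "Steven Murawski", "ThiefMaster", "Brad Larson", "George Stocker", "jjnguy", "Adam Lear", "casperOne", "NullUserException อ_อ", "BoltClock's a Unicorn",
--     "Kev", "Lasse V. Karlsen", "Alex Miller", "Nick Craver", "random", "Sampson", "Ivo Flipse", "mmyers", "Gumbo"]
--     return sheriffDisplayNames
-- ===== SOURCE B (Python) =====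
-- def getSheriffBadgeDisplayNames():
--     sheriffDisplayNames = ["Journeyman Geek", "Yaakov Ellis", "Mendy Rodriguez", "Ham Vocke",
--     "Jane Willborn", "Tinkeringbell", "Laura Campbell", "Sara Chipps", "Aaron Shekey", "Ben Kelly", "g3rv4", "Vasudha Swaminathan", "kristinalustig",
--     "Horia Coman", "Ted Goas", "Benjamin Hodgson", "Des", "Tom Floyd", "Nicolas Chabanovsky", "Kurtis Beavers",
--     "Donna", "Alex Miller", "Dean Ward", "Alex Warren", "Jon Chan", "Brian Nickel", "Tom Limoncelli", "Juice", "Hynes", "Kasra Rahjerdi", "ChrisF", "Gordon",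
--     "Flexo", "Andrew Barber", "Max", "Steven Murawski", "ThiefMaster", "Brad Larson", "George Stocker", "jjnguy", "Adam Lear", "casperOne", "NullUserException อ_อ", "BoltClock's a Unicorn",
--     "Kev", "Lasse V. Karlsen", "Alex Miller", "Nick Craver", "random", "Sampson", "Ivo Flipse", "mmyers", "Gumbo"]
--     return sheriffDisplayNames
--
-- def getSheriffBadgeUserIds(users):
--     sheriffNames = getSheriffBadgeDisplayNames()
--     firstIds = {}
--     for user in users:
--         name = user.get('DisplayName')
--         if name in sheriffNames and name not in firstIds:
--             firstIds[name] = user.get('Id')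
--     firstIds['Kev'] = '419'
--     firstIds['Max'] = '189572'
--     return list(firstIds.values())
-- ===== Notes on version B (the rewrite author's own statement) =====
-- stated objective: simpler
-- what changed: B keeps a dict of scalar first Ids (storing only the first Id per sheriff name instead of A's growing id-lists), overwrites the 'Kev'/'Max' entries, and returns list(values()) directly, merging A's build-lists-then-extract-[0] two-pass shape into one pass.
import Mathlib
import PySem

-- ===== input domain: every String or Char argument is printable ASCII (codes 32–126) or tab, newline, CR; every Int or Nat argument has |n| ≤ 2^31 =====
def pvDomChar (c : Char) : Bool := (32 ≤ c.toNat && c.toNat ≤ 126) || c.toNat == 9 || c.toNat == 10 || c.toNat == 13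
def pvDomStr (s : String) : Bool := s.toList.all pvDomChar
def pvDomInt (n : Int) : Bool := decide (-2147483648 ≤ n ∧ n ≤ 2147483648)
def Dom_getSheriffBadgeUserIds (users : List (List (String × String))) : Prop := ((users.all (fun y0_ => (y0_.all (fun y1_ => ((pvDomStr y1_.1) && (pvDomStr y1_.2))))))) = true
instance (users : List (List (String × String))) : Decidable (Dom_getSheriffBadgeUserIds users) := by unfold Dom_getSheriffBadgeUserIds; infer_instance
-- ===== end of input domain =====

-- B merges A's build-list-dict-then-extract-[0] two-pass shape into one pass over a dict of scalar
-- first Ids, returning its values directly (objective: simpler; same asymptotic cost).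

-- shared helper: user.get(k) on an association list (Python dict lookup = first match)
def pvGet (u : List (String × String)) (k : String) : Option String :=
  (u.find? (fun kv => kv.1 == k)).map (·.2)

-- shared constant: getSheriffBadgeDisplayNames()
def pvSheriffNames : List String := ["Journeyman Geek", "Yaakov Ellis", "Mendy Rodriguez", "Ham Vocke",
  "Jane Willborn", "Tinkeringbell", "Laura Campbell", "Sara Chipps", "Aaron Shekey", "Ben Kelly", "g3rv4", "Vasudha Swaminathan", "kristinalustig",
  "Horia Coman", "Ted Goas", "Benjamin Hodgson", "Des", "Tom Floyd", "Nicolas Chabanovsky", "Kurtis Beavers",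
  "Donna", "Alex Miller", "Dean Ward", "Alex Warren", "Jon Chan", "Brian Nickel", "Tom Limoncelli", "Juice", "Hynes", "Kasra Rahjerdi", "ChrisF", "Gordon",
  "Flexo", "Andrew Barber", "Max", "Steven Murawski", "ThiefMaster", "Brad Larson", "George Stocker", "jjnguy", "Adam Lear", "casperOne", "NullUserException อ_อ", "BoltClock's a Unicorn",
  "Kev", "Lasse V. Karlsen", "Alex Miller", "Nick Craver", "random", "Sampson", "Ivo Flipse", "mmyers", "Gumbo"]

-- ===== PORT A =====
-- loop body of A.  ("" transliterates Python's None for a missing 'Id' key: inputs where that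
-- None could reach the returned list are outside Pre_ below, so this is exact on Pre_.)
def pvStepA (d : PySem.Dict String (List String)) (user : List (String × String)) :
    PySem.Dict String (List String) :=
  match pvGet user "DisplayName" with
  | some name =>
      if pvSheriffNames.contains name then
        match d.get? name with
        | some idlist => d.insert name (idlist ++ [(pvGet user "Id").getD ""])
        | none => d.insert name [(pvGet user "Id").getD ""]
      else d
  | none => d  -- None is never in sheriffNames

def getSheriffBadgeUserIds (users : List (List (String × String))) : List String :=
  let namesToIds := users.foldl pvStepA PySem.Dict.empty
  let namesToIds := namesToIds.insert "Kev" ["419"]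
  let namesToIds := namesToIds.insert "Max" ["189572"]
  -- for name in namesToIds: idList.append(namesToIds.get(name)[0])
  -- (get? never returns none on a key of the dict, so the getD [] default is never used)
  namesToIds.keys.foldl
    (fun idList name => idList ++ [(PySem.List.pyGet? ((namesToIds.get? name).getD []) 0).getD ""]) []

-- ===== PORT B =====
-- loop body of B ("" again stands for Python's None for a missing 'Id', outside Pre_)
def pvStepB (d : PySem.Dict String String) (user : List (String × String)) :
    PySem.Dict String String :=
  match pvGet user "DisplayName" with
  | some name =>
      if pvSheriffNames.contains name && !(d.contains name) then
        d.insert name ((pvGet user "Id").getD "")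
      else d
  | none => d

def getSheriffBadgeUserIds_alt (users : List (List (String × String))) : List String :=
  let firstIds := users.foldl pvStepB PySem.Dict.empty
  (((firstIds.insert "Kev" "419").insert "Max" "189572").values)

-- ===== PRECONDITION & SPEC =====
-- Pre_ excludes inputs on which A returns a list containing None instead of a str (not a value of
-- the declared type list[str]): those where the first user bearing some sheriff display name other
-- than "Kev"/"Max" (whose entries are overwritten anyway) lacks an 'Id' key.
def Pre_getSheriffBadgeUserIds (users : List (List (String × String))) : Prop :=
  ∀ n ∈ pvSheriffNames, n ≠ "Kev" → n ≠ "Max" →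
    ∀ u, users.find? (fun u => pvGet u "DisplayName" == some n) = some u →
      u.any (fun kv => kv.1 == "Id") = true
instance (users : List (List (String × String))) : Decidable (Pre_getSheriffBadgeUserIds users) := by
  unfold Pre_getSheriffBadgeUserIds; infer_instance

def pvWitness_getSheriffBadgeUserIds : (List (List (String × String))) :=
  [[("DisplayName", "Donna"), ("Id", "7")], [("DisplayName", "bob")]]

def Spec_getSheriffBadgeUserIds (users : List (List (String × String))) (out : List String) : Prop := out = getSheriffBadgeUserIds_alt users
instance (users : List (List (String × String))) (out : List String) : Decidable (Spec_getSheriffBadgeUserIds users out) := by unfold Spec_getSheriffBadgeUserIds; infer_instance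

-- ===== CLAIM (what is proved, stated in full; the proofs are below) =====
def Claim_equal_getSheriffBadgeUserIds : Prop := ∀ (users : List (List (String × String))), Dom_getSheriffBadgeUserIds users → Pre_getSheriffBadgeUserIds users → Spec_getSheriffBadgeUserIds users (getSheriffBadgeUserIds users)

-- ===== LEMMAS AND PROOFS =====

-- invariant tying A's dict of id-lists to B's dict of first ids
def pvRel (dA : PySem.Dict String (List String)) (dB : PySem.Dict String String) : Prop :=
  dA.keys.Nodup ∧ (∀ p ∈ dA.items, p.2 ≠ []) ∧
    dB.items = dA.items.map (fun p => (p.1, p.2.headD ""))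

theorem pvRel_keys {dA : PySem.Dict String (List String)} {dB : PySem.Dict String String}
    (h : pvRel dA dB) : dB.keys = dA.keys := by
  simp only [PySem.Dict.keys, h.2.2, List.map_map]
  rfl

theorem pv_headD_append (v : List String) (hv : v ≠ []) (x : String) :
    (v ++ [x]).headD "" = v.headD "" := by
  cases v with
  | nil => exact absurd rfl hv
  | cons a t => simp

theorem pvRel_insert_new {dA : PySem.Dict String (List String)} {dB : PySem.Dict String String}
    {k : String} {v : List String} (h : pvRel dA dB) (hv : v ≠ []) :
    pvRel (dA.insert k v) (dB.insert k (v.headD "")) := by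
  obtain ⟨hnd, hne, hit⟩ := h
  have hc : dB.contains k = dA.contains k := by
    simp [PySem.Dict.contains_eq_decide_mem_keys, pvRel_keys ⟨hnd, hne, hit⟩]
  refine ⟨PySem.Dict.nodup_keys_insert dA k v hnd, ?_, ?_⟩
  · intro p hp
    rcases (PySem.Dict.mem_items_insert dA k v p).1 hp with h1 | h1
    · simp [h1, hv]
    · exact hne p h1.1
  · rw [PySem.Dict.items_insert, PySem.Dict.items_insert, hc, hit]
    by_cases hca : dA.contains k = true
    · simp only [hca, if_true, List.map_map]
      apply List.map_congr_left
      intro p _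
      by_cases hpk : p.1 = k <;> simp [hpk]
    · simp [hca]

theorem pvRel_append_existing {dA : PySem.Dict String (List String)} {dB : PySem.Dict String String}
    {k : String} {v : List String} (h : pvRel dA dB) (hv : dA.get? k = some v) (x : String) :
    pvRel (dA.insert k (v ++ [x])) dB := by
  obtain ⟨hnd, hne, hit⟩ := h
  have hkv : (k, v) ∈ dA.items := PySem.Dict.mem_items_of_get?_eq_some _ hv
  have hca : dA.contains k = true := by
    rw [PySem.Dict.contains_eq_isSome_get?, hv]; rfl
  have hvne : v ≠ [] := hne (k, v) hkv
  refine ⟨PySem.Dict.nodup_keys_insert dA k _ hnd, ?_, ?_⟩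
  · intro p hp
    rcases (PySem.Dict.mem_items_insert dA k (v ++ [x]) p).1 hp with h1 | h1
    · simp [h1, hvne]
    · exact hne p h1.1
  · rw [PySem.Dict.items_insert, hit]
    simp only [hca, if_true, List.map_map]
    apply List.map_congr_left
    intro p hp
    by_cases hpk : p.1 = k
    · have hp2 : dA.get? p.1 = some p.2 := by
        have hmem : (p.1, p.2) ∈ dA.items := by simpa using hp
        exact PySem.Dict.get?_of_mem_items _ hmem hnd
      rw [hpk, hv] at hp2
      have hpv : p.2 = v := (Option.some.inj hp2).symm
      have hbeq : (p.1 == k) = true := by simp [hpk]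
      simp only [Function.comp_apply, hbeq, if_true]
      show (p.1, p.2.headD "") = (k, (v ++ [x]).headD "")
      rw [hpk, hpv, pv_headD_append v hvne x]
    · simp [Function.comp, hpk]

theorem pvRel_step {dA : PySem.Dict String (List String)} {dB : PySem.Dict String String}
    (h : pvRel dA dB) (u : List (String × String)) : pvRel (pvStepA dA u) (pvStepB dB u) := by
  unfold pvStepA pvStepB
  cases hg : pvGet u "DisplayName" with
  | none => exact h
  | some name =>
    have hc : dB.contains name = dA.contains name := by
      simp [PySem.Dict.contains_eq_decide_mem_keys, pvRel_keys h]
    by_cases hs : pvSheriffNames.contains name = true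
    · cases hgn : dA.get? name with
      | some idlist =>
        have hca : dA.contains name = true := by
          rw [PySem.Dict.contains_eq_isSome_get?, hgn]; rfl
        simp only [hgn, hs, hc, hca, Bool.not_true, Bool.and_false, Bool.false_eq_true, if_false]
        exact pvRel_append_existing h hgn ((pvGet u "Id").getD "")
      | none =>
        have hca : dA.contains name = false := by
          rw [PySem.Dict.contains_eq_isSome_get?, hgn]; rfl
        simp only [hgn, hs, hc, hca, Bool.not_false, Bool.and_true, if_true]
        exact pvRel_insert_new h (v := [(pvGet u "Id").getD ""]) (by simp)
    · have hs' : pvSheriffNames.contains name = false := by simpa using hs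
      simp only [hs', Bool.false_and, Bool.false_eq_true, if_false]
      exact h

theorem pvRel_foldl (us : List (List (String × String)))
    {dA : PySem.Dict String (List String)} {dB : PySem.Dict String String}
    (h : pvRel dA dB) : pvRel (us.foldl pvStepA dA) (us.foldl pvStepB dB) := by
  induction us generalizing dA dB with
  | nil => exact h
  | cons u t ih => exact ih (pvRel_step h u)

theorem pvGet0_headD (v : List String) : (PySem.List.pyGet? v 0).getD "" = v.headD "" := by
  cases v <;> simp [PySem.List.pyGet?, PySem.List.pyIdx?]

theorem pvRel_out {dA : PySem.Dict String (List String)} {dB : PySem.Dict String String}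
    (h : pvRel dA dB) :
    dA.keys.foldl (fun idList name => idList ++ [(PySem.List.pyGet? ((dA.get? name).getD []) 0).getD ""]) []
      = dB.values := by
  obtain ⟨hnd, _, hit⟩ := h
  rw [PySem.List.foldl_append_singleton_eq_map]
  have hvals : dB.values = dA.items.map (fun p => p.2.headD "") := by
    simp only [PySem.Dict.values, hit, List.map_map]; rfl
  rw [hvals, PySem.Dict.items_eq_map_keys dA hnd [], List.map_map]
  apply List.map_congr_left
  intro k _
  simp only [Function.comp, pvGet0_headD, PySem.Dict.getD_eq_get?_getD]

-- ===== VERDICT (by name: the statement is the Claim_ definition above) =====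
theorem getSheriffBadgeUserIds_spec : Claim_equal_getSheriffBadgeUserIds := by
  intro users _ _
  unfold Spec_getSheriffBadgeUserIds getSheriffBadgeUserIds getSheriffBadgeUserIds_alt
  have h0 : pvRel PySem.Dict.empty PySem.Dict.empty := by
    refine ⟨by simp [PySem.Dict.keys, PySem.Dict.empty], by simp [PySem.Dict.empty], by simp [PySem.Dict.empty]⟩
  have h1 := pvRel_foldl users h0
  have h2 := pvRel_insert_new h1 (k := "Kev") (v := ["419"]) (by simp)
  have h3 := pvRel_insert_new h2 (k := "Max") (v := ["189572"]) (by simp)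
  exact pvRel_out h3
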